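-- pv_equiv track=rewrite | github.com/wolfmib/ja_db_02 | pre_modified_clientsdata_UpdatViewStep1_ofX.py | anonymize_action
-- ===== SOURCE A (Python) =====
-- def anonymize_action(text):
--     if isinstance(text, str):
--         replacements = {
--             "email": "notice",
--             "submission": "update",
--             "reminder": "alert",
--             "contact": "reach-out",
--             "token": "identifier"
--         }
--         for k, v in replacements.items():
--             text = text.replace(k, v)
--     return text
-- ===== SOURCE B (Python) =====
-- def _pass(s, k, v):
--     """Replace every occurrence of k in s by v, recursively, via find and slicing."""
--     i = s.find(k)
--     if i == -1:
--         return s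
--     return s[:i] + v + _pass(s[i + len(k):], k, v)
--
--
-- def _apply(s, pairs):
--     if not pairs:
--         return s
--     (k, v) = pairs[0]
--     return _apply(_pass(s, k, v), pairs[1:])
--
--
-- def anonymize_action(text):
--     if isinstance(text, str):
--         return _apply(text, [("email", "notice"), ("submission", "update"),
--                              ("reminder", "alert"), ("contact", "reach-out"),
--                              ("token", "identifier")])
--     return text
-- ===== Notes on version B (the rewrite author's own statement) =====
-- stated objective: alternative
-- what changed: The dict-driven for loop of five builtin str.replace passes is replaced by recursion over an explicit pair list whose per-key pass is a hand-written recursive find-and-slice scan (find leftmost occurrence, emit prefix plus value, recurse on the remainder).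
import Mathlib
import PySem

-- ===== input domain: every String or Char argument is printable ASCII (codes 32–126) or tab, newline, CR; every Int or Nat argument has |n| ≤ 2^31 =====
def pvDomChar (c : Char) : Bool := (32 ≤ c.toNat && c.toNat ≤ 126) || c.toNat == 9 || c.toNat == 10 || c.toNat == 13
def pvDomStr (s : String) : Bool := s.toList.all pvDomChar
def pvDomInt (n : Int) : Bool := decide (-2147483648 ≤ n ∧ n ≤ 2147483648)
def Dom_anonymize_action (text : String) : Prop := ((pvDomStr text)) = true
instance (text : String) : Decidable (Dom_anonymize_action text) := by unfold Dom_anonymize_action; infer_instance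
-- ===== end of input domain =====

-- B replaces A's dict loop of five builtin str.replace passes by recursion over an explicit
-- pair list whose per-key pass is a hand-written recursive find-and-slice scan (alternative;
-- same cost). A's isinstance(text, str) guard is vacuous here: the port is typed String.

-- ===== PORT A =====
def anonymize_action (text : String) : String :=
  ([("email", "notice"), ("submission", "update"), ("reminder", "alert"),
    ("contact", "reach-out"), ("token", "identifier")] : List (String × String)).foldl
    (fun t kv => PySem.Str.replace t kv.1 kv.2) text

-- ===== PORT B =====
-- Source B's _pass: replace every occurrence of the key (c :: ks) by v via find and slicing.
-- The key is passed as head :: tail so that it is nonempty by construction (all five keys are).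
def pvPass (c : Char) (ks v : List Char) (s : List Char) : List Char :=
  let i := PySem.Chars.find s (c :: ks)
  if i = -1 then s
  else
    PySem.List.slice s none (some i) ++ v ++
      pvPass c ks v (PySem.List.slice s (some (i + ((c :: ks).length : Int))) none)
termination_by s.length
decreasing_by
  have h0 : 0 ≤ PySem.Chars.find s (c :: ks) := by
    have := PySem.Chars.neg_one_le_find s (c :: ks); omega
  have hin : (c :: ks) <:+: s := (PySem.Chars.find_nonneg_iff s (c :: ks)).mp h0
  have hlen : (c :: ks).length ≤ s.length := hin.length_le
  rw [show PySem.Chars.find s (c :: ks) + ((c :: ks).length : Int)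
        = (((PySem.Chars.find s (c :: ks)).toNat + (c :: ks).length : Nat) : Int) by push_cast; omega,
      PySem.List.slice_from_natCast]
  simp only [List.length_drop, List.length_cons] at *
  omega

-- Source B's _apply: recursion over the list of (key, value) pairs.
def pvApply (pairs : List ((Char × List Char) × List Char)) (s : List Char) : List Char :=
  match pairs with
  | [] => s
  | ((c, ks), v) :: rest => pvApply rest (pvPass c ks v s)

def anonymize_action_alt (text : String) : String :=
  String.ofList (pvApply
    [(('e', "mail".toList), "notice".toList),
     (('s', "ubmission".toList), "update".toList),
     (('r', "eminder".toList), "alert".toList),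
     (('c', "ontact".toList), "reach-out".toList),
     (('t', "oken".toList), "identifier".toList)] text.toList)

-- ===== PRECONDITION & SPEC =====
def Spec_anonymize_action (text : String) (out : String) : Prop := out = anonymize_action_alt text
instance (text : String) (out : String) : Decidable (Spec_anonymize_action text out) := by unfold Spec_anonymize_action; infer_instance

-- ===== CLAIM (what is proved, stated in full; the proofs are below) =====
def Claim_equal_anonymize_action : Prop := ∀ (text : String), Dom_anonymize_action text → Spec_anonymize_action text (anonymize_action text)

-- ===== LEMMAS AND PROOFS =====

-- Chars.find is characterised by "first occurrence": pin its value from occurrence + minimality.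
theorem pv_find_eq (s k : List Char) (j : Nat) (hj : k <+: s.drop j)
    (hmin : ∀ i < j, ¬ k <+: s.drop i) : PySem.Chars.find s k = (j : Int) := by
  have hinf : k <:+: s := hj.isInfix.trans (List.drop_suffix j s).isInfix
  have h0 : 0 ≤ PySem.Chars.find s k := (PySem.Chars.find_nonneg_iff s k).mpr hinf
  obtain ⟨hpre, hm⟩ := PySem.Chars.find_spec (s := s) (sub := k) h0
  rcases lt_trichotomy (PySem.Chars.find s k).toNat j with h | h | h
  · exact absurd hpre (hmin _ h)
  · omega
  · exact absurd hj (hm j h)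

theorem pv_find_zero (s k : List Char) (h : k <+: s) : PySem.Chars.find s k = 0 := by
  have := pv_find_eq s k 0 (by simpa using h) (by omega)
  simpa using this

theorem pv_find_cons (x : Char) (t k : List Char) (hk : ¬ k <+: (x :: t)) :
    PySem.Chars.find (x :: t) k =
      if PySem.Chars.find t k = -1 then -1 else PySem.Chars.find t k + 1 := by
  by_cases hf : PySem.Chars.find t k = -1
  · rw [if_pos hf, PySem.Chars.find_eq_neg_one_iff]
    rw [PySem.Chars.find_eq_neg_one_iff] at hf
    intro hin
    rcases List.infix_cons_iff.mp hin with h | h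
    · exact hk h
    · exact hf h
  · rw [if_neg hf]
    have h0 : 0 ≤ PySem.Chars.find t k := by
      have := PySem.Chars.neg_one_le_find t k; omega
    obtain ⟨hpre, hm⟩ := PySem.Chars.find_spec (s := t) (sub := k) h0
    have := pv_find_eq (x :: t) k ((PySem.Chars.find t k).toNat + 1)
      (by simpa using hpre)
      (by
        intro i hi
        cases i with
        | zero => simpa using hk
        | succ i' => exact fun hp => hm i' (by omega) (by simpa using hp))
    rw [this]; push_cast; omega

-- A non-matching head char passes through the find-and-slice scan unchanged.
theorem pv_pass_cons (c : Char) (ks v : List Char) (x : Char) (t : List Char)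
    (hk : ¬ (c :: ks) <+: (x :: t)) :
    pvPass c ks v (x :: t) = x :: pvPass c ks v t := by
  by_cases hf : PySem.Chars.find t (c :: ks) = -1
  · have hxf : PySem.Chars.find (x :: t) (c :: ks) = -1 := by
      rw [pv_find_cons _ _ _ hk, if_pos hf]
    conv_lhs => rw [pvPass]
    conv_rhs => rw [pvPass]
    simp [hxf, hf]
  · have h0 : 0 ≤ PySem.Chars.find t (c :: ks) := by
      have := PySem.Chars.neg_one_le_find t (c :: ks); omega
    obtain ⟨n, hn⟩ : ∃ n : Nat, PySem.Chars.find t (c :: ks) = (n : Int) :=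
      ⟨_, (Int.toNat_of_nonneg h0).symm⟩
    have hxf : PySem.Chars.find (x :: t) (c :: ks) = ((n + 1 : Nat) : Int) := by
      rw [pv_find_cons _ _ _ hk, if_neg hf, hn]; push_cast; omega
    conv_lhs => rw [pvPass]
    conv_rhs => rw [pvPass]
    simp only [hxf, hn]
    rw [if_neg (by push_cast; omega), if_neg (by rw [hn] at hf; exact hf)]
    rw [show ((n + 1 : Nat) : Int) + ((c :: ks).length : Int)
          = ((n + 1 + (c :: ks).length : Nat) : Int) by push_cast; omega,
        show (n : Int) + ((c :: ks).length : Int) = ((n + (c :: ks).length : Nat) : Int) by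
          push_cast; omega,
        PySem.List.slice_to_natCast, PySem.List.slice_to_natCast,
        PySem.List.slice_from_natCast, PySem.List.slice_from_natCast]
    simp only [List.take_succ_cons, List.cons_append, List.cons.injEq, true_and,
      List.append_assoc]
    have harith : n + 1 + (c :: ks).length = (n + (c :: ks).length) + 1 := by
      simp; omega
    rw [harith, List.drop_succ_cons]

theorem pv_pass_nil (c : Char) (ks v : List Char) : pvPass c ks v [] = [] := by
  rw [pvPass]
  have : PySem.Chars.find [] (c :: ks) = -1 :=
    (PySem.Chars.find_eq_neg_one_iff _ _).mpr (by simp)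
  simp [this]

theorem pv_pass_prefix (c : Char) (ks v s : List Char) (h : (c :: ks) <+: s) :
    pvPass c ks v s = v ++ pvPass c ks v (s.drop (c :: ks).length) := by
  conv_lhs => rw [pvPass]
  have hf : PySem.Chars.find s (c :: ks) = 0 := pv_find_zero s _ h
  simp only [hf]
  rw [if_neg (by omega)]
  rw [show (0 : Int) + ((c :: ks).length : Int) = (((c :: ks).length : Nat) : Int) by omega,
      PySem.List.slice_from_natCast]
  rw [show (0 : Int) = ((0 : Nat) : Int) by rfl, PySem.List.slice_to_natCast]
  simp

-- The char-by-char scanner of PySem's builtin replace equals the find-and-slice scan.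
theorem pv_go_eq (c : Char) (ks v : List Char) :
    ∀ (fuel : Nat) (l acc : List Char), l.length ≤ fuel →
      PySem.Chars.replace.go (c :: ks) v fuel l acc = acc.reverse ++ pvPass c ks v l := by
  intro fuel
  induction fuel with
  | zero =>
    intro l acc hl
    have : l = [] := by cases l <;> simp_all
    subst this
    simp [PySem.Chars.replace.go, pv_pass_nil]
  | succ fuel ih =>
    intro l acc hl
    cases l with
    | nil => simp [PySem.Chars.replace.go, pv_pass_nil]
    | cons x t =>
      rw [PySem.Chars.replace.go]
      by_cases hp : (c :: ks).isPrefixOf (x :: t)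
      · rw [if_pos hp]
        have hpre : (c :: ks) <+: (x :: t) := List.isPrefixOf_iff_prefix.mp hp
        rw [ih _ _ (by simp at hl ⊢; omega)]
        rw [pv_pass_prefix c ks v _ hpre]
        simp
      · rw [if_neg hp]
        have hnp : ¬ (c :: ks) <+: (x :: t) := fun h => hp (List.isPrefixOf_iff_prefix.mpr h)
        rw [ih _ _ (by simp at hl ⊢; omega)]
        rw [pv_pass_cons c ks v x t hnp]
        simp

theorem pv_replace_eq (c : Char) (ks v s : List Char) :
    PySem.Chars.replace s (c :: ks) v = pvPass c ks v s := by
  rw [PySem.Chars.replace]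
  simp only [List.isEmpty_cons]
  rw [pv_go_eq c ks v s.length s [] le_rfl]
  simp

theorem pv_main (text : String) : anonymize_action text = anonymize_action_alt text := by
  simp only [anonymize_action, anonymize_action_alt, List.foldl, pvApply, PySem.Str.replace]
  rw [show ("email".toList) = 'e' :: "mail".toList from rfl,
      show ("submission".toList) = 's' :: "ubmission".toList from rfl,
      show ("reminder".toList) = 'r' :: "eminder".toList from rfl,
      show ("contact".toList) = 'c' :: "ontact".toList from rfl,
      show ("token".toList) = 't' :: "oken".toList from rfl]
  simp only [String.toList_ofList, pv_replace_eq]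

-- ===== VERDICT (by name: the statement is the Claim_ definition above) =====
theorem anonymize_action_spec : Claim_equal_anonymize_action := by
  intro text _
  unfold Spec_anonymize_action
  exact pv_main text
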